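-- pv_equiv track=rewrite | github.com/GabrielJospin/Estudos | hipotenusa.py | hip_sum
-- ===== SOURCE A (Python) =====
-- def hip_test (c):
-- 	a = 1
-- 	b = 1
-- 	while c > a:
-- 		a += 1
-- 		b = 1
-- 		while c > a and c > b:
-- 			b +=1
-- 			if c**2 == a**2 + b**2:
-- 				return True
-- 				break
-- 	return False
--
-- def hip_sum(c):
-- 	i = 0
-- 	sum = 0
-- 	while i<= c:
-- 		if hip_test(i):
-- 			sum += i
-- 		i += 1
-- 	return sum
-- ===== SOURCE B (Python) =====
-- def hip_sum(c):
--     squares = {k * k for k in range(1, c + 1)}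
--     total = 0
--     for h in range(2, c + 1):
--         hh = h * h
--         if any(hh - a * a in squares for a in range(1, h)):
--             total += h
--     return total
-- ===== Notes on version B (the rewrite author's own statement) =====
-- stated objective: faster
-- what changed: A tests each candidate i in 0..c with a fresh double trial loop over both legs (cubic overall); B builds the set of squares once and, per candidate hypotenuse h, scans legs a with an O(1) set-membership test for h*h-a*a.
import Mathlib
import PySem

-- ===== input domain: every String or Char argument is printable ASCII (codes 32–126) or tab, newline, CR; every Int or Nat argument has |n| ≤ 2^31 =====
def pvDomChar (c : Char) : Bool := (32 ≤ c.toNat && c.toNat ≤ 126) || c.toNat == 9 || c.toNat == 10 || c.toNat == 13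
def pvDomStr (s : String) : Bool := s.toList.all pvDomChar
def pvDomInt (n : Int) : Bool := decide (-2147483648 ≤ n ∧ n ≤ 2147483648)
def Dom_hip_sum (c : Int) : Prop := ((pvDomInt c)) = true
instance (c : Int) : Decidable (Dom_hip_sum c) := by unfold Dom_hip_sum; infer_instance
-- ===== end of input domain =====

-- B builds a set of leg-pair squares once and scans leg pairs with an O(1) set lookup,
-- replacing A's per-candidate nested trial loops (objective: faster).

-- ===== PORT A =====
-- inner 'while c > a and c > b' loop of hip_test
def hipInner (c a b : Int) : Bool :=
  if _h : c > a ∧ c > b then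
    let b' := b + 1
    if c ^ 2 = a ^ 2 + b' ^ 2 then true
    else hipInner c a b'
  else false
termination_by (c - b).toNat
decreasing_by omega

-- outer 'while c > a' loop of hip_test
def hipOuter (c a : Int) : Bool :=
  if _h : c > a then
    let a' := a + 1
    if hipInner c a' 1 then true
    else hipOuter c a'
  else false
termination_by (c - a).toNat
decreasing_by omega

def hip_test (c : Int) : Bool := hipOuter c 1

-- 'while i <= c' loop of hip_sum
def hipSumLoop (c i sum : Int) : Int :=
  if _h : i ≤ c then
    hipSumLoop c (i + 1) (if hip_test i then sum + i else sum)
  else sum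
termination_by (c + 1 - i).toNat
decreasing_by omega

def hip_sum (c : Int) : Int := hipSumLoop c 0 0

-- ===== PORT B =====
def hip_sum_alt (c : Int) : Int :=
  let squares : PySem.Set Int :=
    PySem.Set.ofList ((PySem.List.pyRange 1 (c + 1) 1).map (fun k => k * k))
  (PySem.List.pyRange 2 (c + 1) 1).foldl
    (fun total h =>
      let hh := h * h
      if (PySem.List.pyRange 1 h 1).any (fun a => squares.contains (hh - a * a)) then total + h
      else total)
    0

-- ===== PRECONDITION & SPEC =====
def Spec_hip_sum (c : Int) (out : Int) : Prop := out = hip_sum_alt c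
instance (c : Int) (out : Int) : Decidable (Spec_hip_sum c out) := by unfold Spec_hip_sum; infer_instance

-- ===== CLAIM (what is proved, stated in full; the proofs are below) =====
def Claim_equal_hip_sum : Prop := ∀ (c : Int), Dom_hip_sum c → Spec_hip_sum c (hip_sum c)

-- ===== LEMMAS AND PROOFS =====

-- h is the hypotenuse of a Pythagorean pair of positive legs
def IsHyp (h : Int) : Prop := ∃ a b : Int, 1 ≤ a ∧ a < h ∧ 1 ≤ b ∧ b < h ∧ h ^ 2 = a ^ 2 + b ^ 2

theorem hipInner_iff (c a b : Int) :
    hipInner c a b = true ↔ c > a ∧ ∃ b', b < b' ∧ b' ≤ c ∧ c ^ 2 = a ^ 2 + b' ^ 2 := by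
  induction b using hipInner.induct (c := c) (a := a) with
  | case1 b hcond b' heq =>
    rw [hipInner]
    simp only [dif_pos hcond]
    rw [if_pos (heq : c ^ 2 = a ^ 2 + (b + 1) ^ 2)]
    simp only [true_iff]
    exact ⟨hcond.1, b + 1, by omega, by omega, heq⟩
  | case2 b hcond b' hne ih =>
    rw [hipInner]
    simp only [dif_pos hcond]
    rw [if_neg (hne : ¬ c ^ 2 = a ^ 2 + (b + 1) ^ 2)]
    have ih' : hipInner c a (b + 1) = true ↔
        c > a ∧ ∃ b'', b + 1 < b'' ∧ b'' ≤ c ∧ c ^ 2 = a ^ 2 + b'' ^ 2 := ih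
    rw [ih']
    constructor
    · rintro ⟨h1, b'', hb1, hb2, hb3⟩
      exact ⟨h1, b'', by omega, hb2, hb3⟩
    · rintro ⟨h1, b'', hb1, hb2, hb3⟩
      refine ⟨h1, b'', ?_, hb2, hb3⟩
      rcases eq_or_lt_of_le (by omega : b + 1 ≤ b'') with h | h
      · subst h; exact absurd hb3 hne
      · omega
  | case3 b hcond =>
    rw [hipInner]
    simp only [dif_neg hcond, Bool.false_eq_true, false_iff]
    rintro ⟨h1, b', hb1, hb2, hb3⟩
    push Not at hcond
    omega

theorem hipOuter_iff (c a : Int) :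
    hipOuter c a = true ↔ ∃ a', a < a' ∧ a' < c ∧ ∃ b', 1 < b' ∧ b' ≤ c ∧ c ^ 2 = a' ^ 2 + b' ^ 2 := by
  induction a using hipOuter.induct (c := c) with
  | case1 a hcond a' hinner =>
    rw [hipOuter]
    simp only [dif_pos hcond]
    rw [if_pos (hinner : hipInner c (a + 1) 1 = true)]
    simp only [true_iff]
    have h2 := (hipInner_iff c (a + 1) 1).mp hinner
    obtain ⟨hlt, b', hb1, hb2, hb3⟩ := h2
    exact ⟨a + 1, by omega, by omega, b', hb1, hb2, hb3⟩
  | case2 a hcond a' hinner ih =>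
    rw [hipOuter]
    simp only [dif_pos hcond]
    rw [if_neg (hinner : ¬ hipInner c (a + 1) 1 = true)]
    have ih' : hipOuter c (a + 1) = true ↔
        ∃ a'', a + 1 < a'' ∧ a'' < c ∧ ∃ b', 1 < b' ∧ b' ≤ c ∧ c ^ 2 = a'' ^ 2 + b' ^ 2 := ih
    rw [ih']
    constructor
    · rintro ⟨a'', h1, h2, hb⟩
      exact ⟨a'', by omega, h2, hb⟩
    · rintro ⟨a'', h1, h2, b', hb1, hb2, hb3⟩
      rcases eq_or_lt_of_le (by omega : a + 1 ≤ a'') with h | h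
      · exfalso
        apply hinner
        rw [hipInner_iff]
        exact ⟨by omega, b', by omega, hb2,
          by show c ^ 2 = (a + 1) ^ 2 + b' ^ 2; rw [h]; exact hb3⟩
      · exact ⟨a'', h, h2, b', hb1, hb2, hb3⟩
  | case3 a hcond =>
    rw [hipOuter]
    simp only [dif_neg hcond, Bool.false_eq_true, false_iff]
    rintro ⟨a', h1, h2, _⟩
    omega

-- in any positive-leg decomposition both legs are ≥ 2
theorem legs_ge_two (h a b : Int) (ha1 : 1 ≤ a) (hah : a < h) (hb1 : 1 ≤ b)
    (hbh : b < h) (he : h ^ 2 = a ^ 2 + b ^ 2) : 2 ≤ a ∧ 2 ≤ b := by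
  constructor
  · by_contra hc
    have ha : a = 1 := by omega
    subst ha
    nlinarith
  · by_contra hc
    have hb : b = 1 := by omega
    subst hb
    nlinarith

theorem hip_test_iff (h : Int) : hip_test h = true ↔ IsHyp h := by
  rw [hip_test, hipOuter_iff]
  constructor
  · rintro ⟨a, ha1, hah, b, hb1, hbh, he⟩
    have hblt : b < h := by nlinarith
    exact ⟨a, b, by omega, hah, by omega, hblt, he⟩
  · rintro ⟨a, b, ha1, hah, hb1, hbh, he⟩
    obtain ⟨h2a, h2b⟩ := legs_ge_two h a b ha1 hah hb1 hbh he
    exact ⟨a, by omega, hah, b, by omega, by omega, he⟩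

theorem hip_test_false_of_le_one (t : Int) (ht : t ≤ 1) : hip_test t = false := by
  rw [Bool.eq_false_iff]
  intro hcontra
  obtain ⟨a, b, ha1, hah, _⟩ := (hip_test_iff t).mp hcontra
  omega

theorem hipSumLoop_eq (c i s : Int) :
    hipSumLoop c i s =
      (PySem.List.pyRange i (c + 1) 1).foldl (fun t h => if hip_test h then t + h else t) s := by
  induction i, s using hipSumLoop.induct (c := c) with
  | case1 i s hcond ih =>
    rw [hipSumLoop, dif_pos hcond]
    rw [PySem.List.pyRange_one_cons (by omega : i < c + 1), List.foldl_cons]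
    split at ih <;> split <;> simp_all
  | case2 i s hcond =>
    rw [hipSumLoop, dif_neg hcond]
    rw [PySem.List.pyRange_one_eq_nil (by omega : c + 1 ≤ i), List.foldl_nil]

theorem testB_iff (c h : Int) (h2 : 2 ≤ h) (hc : h ≤ c) :
    ((PySem.List.pyRange 1 h 1).any (fun a =>
      (PySem.Set.ofList ((PySem.List.pyRange 1 (c + 1) 1).map (fun k => k * k))).contains
        (h * h - a * a))) = true ↔ IsHyp h := by
  rw [List.any_eq_true]
  simp only [PySem.Set.contains_iff, PySem.Set.mem_ofList, List.mem_map,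
    PySem.List.mem_pyRange_one]
  constructor
  · rintro ⟨a, ⟨ha1, hah⟩, k, ⟨hk1, hkc⟩, hk⟩
    have hklt : k < h := by nlinarith
    exact ⟨a, k, ha1, hah, hk1, hklt, by nlinarith⟩
  · rintro ⟨a, b, ha1, hah, hb1, hbh, he⟩
    exact ⟨a, ⟨ha1, hah⟩, b, ⟨hb1, by omega⟩, by nlinarith⟩

-- ===== VERDICT (by name: the statement is the Claim_ definition above) =====
theorem hip_sum_spec : Claim_equal_hip_sum := by
  intro c _
  unfold Spec_hip_sum hip_sum hip_sum_alt
  rw [hipSumLoop_eq]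
  by_cases hc : 1 ≤ c
  · rw [PySem.List.pyRange_one_append 0 2 (c + 1) (by omega) (by omega), List.foldl_append]
    have h02 : PySem.List.pyRange 0 2 1 = [0, 1] := by
      rw [PySem.List.pyRange_one_cons (by omega), PySem.List.pyRange_one_cons (by omega),
        PySem.List.pyRange_one_eq_nil (by omega)]
      norm_num
    rw [h02]
    simp only [List.foldl_cons, List.foldl_nil,
      hip_test_false_of_le_one 0 (by omega), hip_test_false_of_le_one 1 (by omega),
      Bool.false_eq_true, if_false]
    apply PySem.List.foldl_congr_mem
    intro acc x hx
    rw [PySem.List.mem_pyRange_one] at hx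
    have hbx : hip_test x =
        ((PySem.List.pyRange 1 x 1).any (fun a =>
          (PySem.Set.ofList ((PySem.List.pyRange 1 (c + 1) 1).map (fun k => k * k))).contains
            (x * x - a * a))) := by
      rw [Bool.eq_iff_iff, hip_test_iff, testB_iff c x (by omega) (by omega)]
    rw [hbx]
  · rw [PySem.List.pyRange_one_eq_nil (show c + 1 ≤ 2 by omega), List.foldl_nil]
    by_cases hc0 : c = 0
    · subst hc0
      rw [show (0 : Int) + 1 = 1 from rfl,
        PySem.List.pyRange_one_cons (by omega : (0 : Int) < 1),
        show (0 : Int) + 1 = 1 from rfl,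
        PySem.List.pyRange_one_eq_nil (by omega : (1 : Int) ≤ 1)]
      simp only [List.foldl_cons, List.foldl_nil]
      split <;> ring
    · rw [PySem.List.pyRange_one_eq_nil (by omega : c + 1 ≤ 0), List.foldl_nil]
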